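-- pv_equiv track=rewrite | github.com/iturams15-stack/apex-omega-trading-system2 | liquidity_map.py | build_liquidity_map
-- ===== SOURCE A (Python) =====
-- def build_liquidity_map(price,levels):
--
--     above=[l for l in levels if l>price]
--     below=[l for l in levels if l<price]
--
--     if len(above)>len(below):
--         return "bullish",10
--
--     if len(below)>len(above):
--         return "bearish",10
--
--     return "neutral",0
-- ===== SOURCE B (Python) =====
-- def build_liquidity_map(price, levels):
--     # Sort once; in sorted order the levels below price are exactly a prefix
--     # and the levels above price exactly a suffix, so two boundary scans
--     # (stopping at the first non-matching element) give both counts.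
--     s = sorted(levels)
--     n = len(s)
--     below = 0
--     while below < n and s[below] < price:
--         below += 1
--     above = 0
--     while above < n and s[n - 1 - above] > price:
--         above += 1
--     if above == below:
--         return "neutral", 0
--     return ("bullish", 10) if above > below else ("bearish", 10)
-- ===== Notes on version B (the rewrite author's own statement) =====
-- stated objective: alternative
-- what changed: B sorts the levels once and finds the two counts as boundary scans (prefix of the sorted list that is < price, prefix of its reverse that is > price), instead of A's two full filtered-list builds over the unsorted input.
import Mathlib
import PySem

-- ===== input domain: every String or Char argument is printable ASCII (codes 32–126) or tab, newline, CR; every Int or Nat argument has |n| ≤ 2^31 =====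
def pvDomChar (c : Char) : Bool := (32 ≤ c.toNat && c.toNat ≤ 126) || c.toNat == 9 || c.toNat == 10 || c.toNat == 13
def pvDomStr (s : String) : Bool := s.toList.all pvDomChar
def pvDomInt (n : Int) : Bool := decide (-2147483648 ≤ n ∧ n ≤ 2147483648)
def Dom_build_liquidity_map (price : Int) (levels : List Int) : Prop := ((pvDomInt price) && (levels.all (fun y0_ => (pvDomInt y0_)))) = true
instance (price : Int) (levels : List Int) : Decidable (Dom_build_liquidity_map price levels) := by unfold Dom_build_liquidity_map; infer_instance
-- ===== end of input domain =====

-- B sorts once and reads both counts off as boundary scans of the sorted list; objective: alternative decomposition (same result, different algorithm).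


-- ===== PORT A =====
def build_liquidity_map (price : Int) (levels : List Int) : String × Int :=
  let above := levels.filter (fun l => l > price)
  let below := levels.filter (fun l => l < price)
  if above.length > below.length then ("bullish", 10)
  else if below.length > above.length then ("bearish", 10)
  else ("neutral", 0)

-- ===== PORT B =====
-- the while loop 'advance the index while in range and the element satisfies p'
-- transcribed as structural recursion over the (rest of the) list
def pvScanWhile (p : Int → Bool) : List Int → Nat
  | [] => 0
  | x :: xs => if p x then pvScanWhile p xs + 1 else 0

def build_liquidity_map_alt (price : Int) (levels : List Int) : String × Int :=
  let s := PySem.List.sorted levels (fun x => x) false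
  let below := pvScanWhile (fun l => l < price) s
  let above := pvScanWhile (fun l => l > price) s.reverse   -- the backwards index loop s[n-1-above]
  if above == below then ("neutral", 0)
  else if above > below then ("bullish", 10) else ("bearish", 10)

-- ===== PRECONDITION & SPEC =====
def Spec_build_liquidity_map (price : Int) (levels : List Int) (out : String × Int) : Prop := out = build_liquidity_map_alt price levels
instance (price : Int) (levels : List Int) (out : String × Int) : Decidable (Spec_build_liquidity_map price levels out) := by unfold Spec_build_liquidity_map; infer_instance

-- ===== CLAIM (what is proved, stated in full; the proofs are below) =====
def Claim_equal_build_liquidity_map : Prop := ∀ (price : Int) (levels : List Int), Dom_build_liquidity_map price levels → Spec_build_liquidity_map price levels (build_liquidity_map price levels)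

-- ===== LEMMAS AND PROOFS =====
-- On a list ordered so that any element after a p-failure also fails p,
-- the boundary scan counts exactly the p-satisfying elements.
theorem pvScanWhile_eq_filter_length (p : Int → Bool) (R : Int → Int → Prop)
    (himp : ∀ a b, R a b → p b = true → p a = true) :
    ∀ (l : List Int), l.Pairwise R → pvScanWhile p l = (l.filter p).length := by
  intro l hl
  induction l with
  | nil => simp [pvScanWhile]
  | cons x xs ih =>
    rcases List.pairwise_cons.mp hl with ⟨hx, hxs⟩
    by_cases hpx : p x = true
    · simp [pvScanWhile, hpx, ih hxs]
    · have hfil : xs.filter p = [] := by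
        rw [List.filter_eq_nil_iff]
        intro y hy hpy
        exact hpx (himp x y (hx y hy) hpy)
      simp [pvScanWhile, hpx, hfil]

theorem blm_below (price : Int) (levels : List Int) :
    pvScanWhile (fun l => l < price) (PySem.List.sorted levels (fun x => x) false)
      = (levels.filter (fun l => l < price)).length := by
  rw [pvScanWhile_eq_filter_length (fun l => decide (l < price)) (· ≤ ·)
      (by intro a b hab hb; simp at *; omega)
      _ (PySem.List.sorted_pairwise levels (fun x => x) )]
  exact ((PySem.List.sorted_perm levels (fun x => x) false).filter _).length_eq

theorem blm_above (price : Int) (levels : List Int) :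
    pvScanWhile (fun l => l > price) (PySem.List.sorted levels (fun x => x) false).reverse
      = (levels.filter (fun l => l > price)).length := by
  rw [pvScanWhile_eq_filter_length (fun l => decide (l > price)) (fun a b => b ≤ a)
      (by intro a b hab hb; simp at *; omega)
      _ (List.pairwise_reverse.mpr (PySem.List.sorted_pairwise levels (fun x => x)))]
  rw [List.filter_reverse, List.length_reverse]
  exact ((PySem.List.sorted_perm levels (fun x => x) false).filter _).length_eq

-- ===== VERDICT (by name: the statement is the Claim_ definition above) =====
theorem build_liquidity_map_spec : Claim_equal_build_liquidity_map := by
  intro price levels _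
  unfold Spec_build_liquidity_map build_liquidity_map build_liquidity_map_alt
  simp only [blm_below, blm_above]
  set a := (levels.filter (fun l => l > price)).length
  set b := (levels.filter (fun l => l < price)).length
  by_cases h : a = b <;> by_cases h2 : a > b <;> simp [h, h2] <;> omega
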